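-- pv_equiv track=rewrite | github.com/tusharneje-07/synedra-ai | AgenticEnv/graph/conflict_resolver.py | _suggest_strategic_resolution
-- ===== SOURCE A (Python) =====
-- def _suggest_strategic_resolution(agent_a: str, agent_b: str) -> str:
--     """Suggest resolution for strategic conflicts."""
--     strategies = {
--         ('trend', 'brand'): "Balance viral potential with brand consistency - test with small audience first",
--         ('trend', 'risk'): "Assess risk tolerance vs opportunity cost - may require brand leadership input",
--         ('engagement', 'trend'): "Consider platform algorithm - some platforms reward depth over reach",
--         ('risk', 'engagement'): "Prioritize safety but explore compliant engagement tactics"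
--     }
--
--     for (type_x, type_y), suggestion in strategies.items():
--         if (agent_a == type_x and agent_b == type_y) or \
--            (agent_a == type_y and agent_b == type_x):
--             return suggestion
--
--     return "Evaluate strategic trade-offs based on campaign goals"
-- ===== SOURCE B (Python) =====
-- def _suggest_strategic_resolution(agent_a: str, agent_b: str) -> str:
--     """Suggest resolution for strategic conflicts."""
--     strategies = {
--         ('brand', 'trend'): "Balance viral potential with brand consistency - test with small audience first",
--         ('risk', 'trend'): "Assess risk tolerance vs opportunity cost - may require brand leadership input",
--         ('engagement', 'trend'): "Consider platform algorithm - some platforms reward depth over reach",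
--         ('engagement', 'risk'): "Prioritize safety but explore compliant engagement tactics",
--     }
--     key = tuple(sorted((agent_a, agent_b)))
--     return strategies.get(key, "Evaluate strategic trade-offs based on campaign goals")
-- ===== Notes on version B (the rewrite author's own statement) =====
-- stated objective: idiomatic
-- what changed: Replaces the scan over the four pairs with its dual-order comparison by a single constant-time lookup under an order-canonicalized key tuple(sorted((agent_a, agent_b))).
import Mathlib
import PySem

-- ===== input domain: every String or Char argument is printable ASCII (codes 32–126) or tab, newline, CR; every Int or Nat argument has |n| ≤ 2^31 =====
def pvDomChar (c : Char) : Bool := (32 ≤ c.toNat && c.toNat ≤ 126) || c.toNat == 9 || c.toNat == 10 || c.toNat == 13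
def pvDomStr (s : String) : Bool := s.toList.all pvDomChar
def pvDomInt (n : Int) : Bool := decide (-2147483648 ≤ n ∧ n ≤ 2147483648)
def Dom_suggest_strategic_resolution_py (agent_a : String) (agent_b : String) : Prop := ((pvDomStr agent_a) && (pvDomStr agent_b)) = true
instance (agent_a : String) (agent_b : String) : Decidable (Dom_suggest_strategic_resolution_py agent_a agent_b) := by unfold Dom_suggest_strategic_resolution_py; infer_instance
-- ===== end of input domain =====

-- B replaces A's scan over the four pairs (each checked in both orders) by one
-- lookup under an order-canonicalized key tuple(sorted((agent_a, agent_b))); idiomatic, no speed claim.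

-- ===== PORT A =====
-- the strategies dict of A, in insertion order
def pvStrategiesA : List ((String × String) × String) :=
  [(("trend", "brand"), "Balance viral potential with brand consistency - test with small audience first"),
   (("trend", "risk"), "Assess risk tolerance vs opportunity cost - may require brand leadership input"),
   (("engagement", "trend"), "Consider platform algorithm - some platforms reward depth over reach"),
   (("risk", "engagement"), "Prioritize safety but explore compliant engagement tactics")]

-- A's `for (type_x, type_y), suggestion in strategies.items(): if … return suggestion`
def pvScanA (agent_a : String) (agent_b : String) : List ((String × String) × String) → String
  | [] => "Evaluate strategic trade-offs based on campaign goals"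
  | ((type_x, type_y), suggestion) :: rest =>
      if (agent_a == type_x && agent_b == type_y) || (agent_a == type_y && agent_b == type_x) then
        suggestion
      else
        pvScanA agent_a agent_b rest

def suggest_strategic_resolution_py (agent_a : String) (agent_b : String) : String :=
  pvScanA agent_a agent_b pvStrategiesA

-- ===== PORT B =====
-- B's dict, keyed by the sorted pair
def pvStrategiesB : PySem.Dict (String × String) String :=
  PySem.Dict.mk
  [(("brand", "trend"), "Balance viral potential with brand consistency - test with small audience first"),
   (("risk", "trend"), "Assess risk tolerance vs opportunity cost - may require brand leadership input"),
   (("engagement", "trend"), "Consider platform algorithm - some platforms reward depth over reach"),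
   (("engagement", "risk"), "Prioritize safety but explore compliant engagement tactics")]

def suggest_strategic_resolution_py_alt (agent_a : String) (agent_b : String) : String :=
  -- key = tuple(sorted((agent_a, agent_b)))
  let key : String × String := if agent_a ≤ agent_b then (agent_a, agent_b) else (agent_b, agent_a)
  PySem.Dict.getD pvStrategiesB key "Evaluate strategic trade-offs based on campaign goals"

-- ===== PRECONDITION & SPEC =====
def Spec_suggest_strategic_resolution_py (agent_a : String) (agent_b : String) (out : String) : Prop := out = suggest_strategic_resolution_py_alt agent_a agent_b
instance (agent_a : String) (agent_b : String) (out : String) : Decidable (Spec_suggest_strategic_resolution_py agent_a agent_b out) := by unfold Spec_suggest_strategic_resolution_py; infer_instance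

-- ===== CLAIM (what is proved, stated in full; the proofs are below) =====
def Claim_equal_suggest_strategic_resolution_py : Prop := ∀ (agent_a : String) (agent_b : String), Dom_suggest_strategic_resolution_py agent_a agent_b → Spec_suggest_strategic_resolution_py agent_a agent_b (suggest_strategic_resolution_py agent_a agent_b)

-- ===== LEMMAS AND PROOFS =====

-- ===== VERDICT (by name: the statement is the Claim_ definition above) =====
set_option maxHeartbeats 4000000 in
theorem suggest_strategic_resolution_py_spec : Claim_equal_suggest_strategic_resolution_py := by
  intro a b _
  unfold Spec_suggest_strategic_resolution_py suggest_strategic_resolution_py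
    suggest_strategic_resolution_py_alt pvStrategiesA pvStrategiesB pvScanA
  by_cases h1 : a = "trend" <;> by_cases h2 : a = "brand" <;>
    by_cases h3 : a = "risk" <;> by_cases h4 : a = "engagement" <;>
    by_cases g1 : b = "trend" <;> by_cases g2 : b = "brand" <;>
    by_cases g3 : b = "risk" <;> by_cases g4 : b = "engagement" <;>
    simp_all [pvScanA, PySem.Dict.getD_eq_get?_getD, PySem.Dict.get?_mk_cons] <;>
    (try split_ifs) <;> (try simp_all [PySem.Dict.get?]) <;>
    first
      | exact absurd (by assumption : (_ : List Char) ≤ _) (by decide)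
      | exact absurd (by assumption : (_ : List Char) < _) (by decide)
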